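-- pv_equiv track=rewrite | github.com/table6/SlowCooker-Pi | lib/mongoslowcooker.py | verify_data
-- ===== SOURCE A (Python) =====
-- collection_requirements = {'rpi_address': ['address'],
--                            'temperature': ['type',
--                                            'temperature',
--                                            'measurement'],
--                            'cook_time': ['start_time'],
--                            'lid_status': ['status']}
--
-- def verify_data(data, collection):
--     if collection not in collection_requirements:
--         return False
--
--     requirements = collection_requirements[collection]
--
--     if len(data) != len(requirements):
--         return False
--
--     for k in data.keys():
--         if k not in requirements:
--             return False
--
--     return True
-- ===== SOURCE B (Python) =====
-- collection_requirements = {'rpi_address': ['address'],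
--                            'temperature': ['type',
--                                            'temperature',
--                                            'measurement'],
--                            'cook_time': ['start_time'],
--                            'lid_status': ['status']}
--
-- def verify_data(data, collection):
--     requirements = collection_requirements.get(collection)
--     if requirements is None:
--         return False
--     return sorted(data.keys()) == sorted(requirements)
-- ===== Notes on version B (the rewrite author's own statement) =====
-- stated objective: alternative
-- what changed: Replaces the length-equality branch and the per-key membership loop with a sort-then-compare: sorted(data.keys()) == sorted(requirements), correct because dict keys and each requirement list are duplicate-free so multiset equality coincides with A's length-plus-membership test.
import Mathlib
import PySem

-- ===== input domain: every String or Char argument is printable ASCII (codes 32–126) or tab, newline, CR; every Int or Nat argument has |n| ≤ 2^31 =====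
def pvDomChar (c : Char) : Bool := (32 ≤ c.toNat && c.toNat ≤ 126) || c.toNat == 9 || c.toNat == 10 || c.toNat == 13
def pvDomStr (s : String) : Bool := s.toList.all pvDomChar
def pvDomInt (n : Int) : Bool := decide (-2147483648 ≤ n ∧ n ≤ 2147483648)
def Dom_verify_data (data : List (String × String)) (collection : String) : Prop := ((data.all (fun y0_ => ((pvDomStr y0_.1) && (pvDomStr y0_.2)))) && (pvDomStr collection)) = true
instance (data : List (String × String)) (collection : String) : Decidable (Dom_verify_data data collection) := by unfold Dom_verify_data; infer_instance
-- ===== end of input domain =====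

-- ===== PORT A =====
-- One line: B replaces A's length check + per-key membership loop by sorting both key lists once and comparing (alternative algorithm, same behaviour).
-- Module constant: collection_requirements (a dict literal).
def collectionRequirements : PySem.Dict String (List String) :=
  PySem.Dict.ofList [("rpi_address", ["address"]),
                     ("temperature", ["type", "temperature", "measurement"]),
                     ("cook_time", ["start_time"]),
                     ("lid_status", ["status"])]

-- 'if collection not in …: return False' + 'requirements = …[collection]' = match on get?;
-- the for-loop with early 'return False' is List.all over the dict's entries (keys).
def verify_data (data : List (String × String)) (collection : String) : Bool :=
  match collectionRequirements.get? collection with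
  | none => false
  | some requirements =>
    if data.length ≠ requirements.length then false
    else data.all (fun kv => requirements.contains kv.1)

-- ===== PORT B =====
-- 'requirements = collection_requirements.get(collection)' + None guard = Option.map … |>.getD false;
-- 'sorted(data.keys()) == sorted(requirements)' = PySem.List.sorted with the identity key on both lists.
def verify_data_alt (data : List (String × String)) (collection : String) : Bool :=
  ((collectionRequirements.get? collection).map (fun requirements =>
      PySem.List.sorted (data.map Prod.fst) (fun x => x) false
        == PySem.List.sorted requirements (fun x => x) false)).getD false

-- ===== PRECONDITION & SPEC =====
-- data is a Python dict, whose keys are necessarily distinct; Pre_ states that shape for the association list.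
def Pre_verify_data (data : List (String × String)) (collection : String) : Prop :=
  (data.map Prod.fst).Nodup
instance (data : List (String × String)) (collection : String) : Decidable (Pre_verify_data data collection) := by unfold Pre_verify_data; infer_instance
def pvWitness_verify_data : (List (String × String)) × String := ([("address", "1 Main St")], "rpi_address")
def Spec_verify_data (data : List (String × String)) (collection : String) (out : Bool) : Prop := out = verify_data_alt data collection
instance (data : List (String × String)) (collection : String) (out : Bool) : Decidable (Spec_verify_data data collection out) := by unfold Spec_verify_data; infer_instance

-- ===== CLAIM (what is proved, stated in full; the proofs are below) =====
def Claim_equal_verify_data : Prop := ∀ (data : List (String × String)) (collection : String), Dom_verify_data data collection → Pre_verify_data data collection → Spec_verify_data data collection (verify_data data collection)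

-- ===== LEMMAS AND PROOFS =====

-- core: for duplicate-free keys and requirements, "same length and every key a requirement"
-- is exactly "the sorted key list equals the sorted requirement list" (a permutation).
lemma agree_core (data : List (String × String)) (reqs : List String)
    (hd : (data.map Prod.fst).Nodup) (hr : reqs.Nodup) :
    (if data.length ≠ reqs.length then false
     else data.all (fun kv => reqs.contains kv.1))
    = (PySem.List.sorted (data.map Prod.fst) (fun x => x) false
        == PySem.List.sorted reqs (fun x => x) false) := by
  rw [Bool.eq_iff_iff, beq_iff_eq, PySem.List.sorted_id_eq_sorted_id_iff_perm]
  constructor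
  · intro hL
    by_cases hlen : data.length = reqs.length
    · rw [if_neg (by simp [hlen])] at hL
      simp only [List.all_eq_true, List.contains_iff_mem] at hL
      have hsub : (data.map Prod.fst).toFinset ⊆ reqs.toFinset := by
        intro y hy
        simp only [List.mem_toFinset, List.mem_map] at hy ⊢
        obtain ⟨kv, hkv, rfl⟩ := hy
        exact hL kv hkv
      have hcard : reqs.toFinset.card ≤ (data.map Prod.fst).toFinset.card := by
        rw [List.toFinset_card_of_nodup hd, List.toFinset_card_of_nodup hr,
          List.length_map, hlen]
      have heq : (data.map Prod.fst).toFinset = reqs.toFinset :=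
        Finset.eq_of_subset_of_card_le hsub hcard
      refine (List.perm_ext_iff_of_nodup hd hr).mpr ?_
      intro x
      constructor
      · intro hx
        exact List.mem_toFinset.mp (heq ▸ List.mem_toFinset.mpr hx)
      · intro hx
        exact List.mem_toFinset.mp (heq ▸ List.mem_toFinset.mpr hx)
    · rw [if_pos (by simp [hlen])] at hL
      exact absurd hL (by simp)
  · intro hperm
    have hlen : data.length = reqs.length := by
      have := hperm.length_eq; simpa using this
    rw [if_neg (by simp [hlen])]
    simp only [List.all_eq_true, List.contains_iff_mem]
    intro kv hkv
    exact hperm.mem_iff.mp (List.mem_map.mpr ⟨kv, hkv, rfl⟩)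

-- any requirements list stored in collection_requirements is duplicate-free
lemma reqs_nodup (collection : String) (reqs : List String)
    (h : collectionRequirements.get? collection = some reqs) : reqs.Nodup := by
  have e : collectionRequirements = PySem.Dict.mk
      [("rpi_address", ["address"]), ("temperature", ["type", "temperature", "measurement"]),
       ("cook_time", ["start_time"]), ("lid_status", ["status"])] := by decide
  rw [e] at h
  simp only [PySem.Dict.get?_mk_cons] at h
  split_ifs at h <;> first | (injection h with h; rw [← h]; decide) | simp [PySem.Dict.get?] at h

-- ===== VERDICT (by name: the statement is the Claim_ definition above) =====
theorem verify_data_spec : Claim_equal_verify_data := by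
  intro data collection _ hpre
  unfold Spec_verify_data verify_data verify_data_alt
  cases h : collectionRequirements.get? collection with
  | none => rfl
  | some reqs =>
    simp only [Option.map_some, Option.getD_some]
    exact agree_core data reqs hpre (reqs_nodup collection reqs h)
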